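-- pv_equiv track=rewrite | github.com/quasylab/spear | redblue.py | variation_red
-- ===== SOURCE A (Python) =====
-- def switch_red_blue(a):
--     if a=="R":
--         return "B"
--     elif a=="RT":
--         return "BT"
--     else:
--         a
--
-- def variation_red(state,n):
--     new_state = [""]*len(state)
--     for i in range(len(state)):
--         if (state[i]=="R" or state[i]=="RT") and n>0:
--             new_state[i] = switch_red_blue(state[i])
--             n = n-1
--         else:
--             new_state[i] = state[i]
--     return new_state
-- ===== SOURCE B (Python) =====
-- def _blue(s):
--     return "B" if s == "R" else "BT" if s == "RT" else s
--
-- def variation_red(state, n):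
--     # Find the cut index k: position just after the n-th red token
--     # (or len(state) if fewer than n reds remain); clamp negative n.
--     remaining = max(n, 0)
--     k = 0
--     for s in state:
--         if remaining == 0:
--             break
--         k += 1
--         if s in ("R", "RT"):
--             remaining -= 1
--     return [_blue(s) for s in state[:k]] + list(state[k:])
-- ===== Notes on version B (the rewrite author's own statement) =====
-- stated objective: alternative
-- what changed: B first computes the cut index just after the n-th red token, then returns a blue-converted map of the prefix concatenated with the untouched suffix, instead of A's single pass that preallocates, indexes and decrements a counter at every element.
import Mathlib
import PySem

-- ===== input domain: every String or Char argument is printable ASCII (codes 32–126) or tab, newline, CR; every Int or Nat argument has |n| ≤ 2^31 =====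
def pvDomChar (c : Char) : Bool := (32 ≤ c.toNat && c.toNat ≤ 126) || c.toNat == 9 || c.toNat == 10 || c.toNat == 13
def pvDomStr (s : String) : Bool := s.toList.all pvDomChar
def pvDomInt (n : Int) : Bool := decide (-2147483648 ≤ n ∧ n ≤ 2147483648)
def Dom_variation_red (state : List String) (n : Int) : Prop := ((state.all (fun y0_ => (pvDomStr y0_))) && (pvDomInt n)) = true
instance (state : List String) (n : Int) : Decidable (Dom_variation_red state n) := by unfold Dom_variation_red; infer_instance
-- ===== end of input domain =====

-- B re-decomposes A: it first finds the cut index just after the n-th red token, then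
-- returns blue-mapped prefix ++ untouched suffix (alternative decomposition, same cost).

-- ===== PORT A =====
-- switch_red_blue: Python's else branch falls through (returns None) but A only
-- calls it on "R"/"RT"; the else value is never observed, ported as "".
def switch_red_blue (a : String) : String :=
  if a == "R" then "B" else if a == "RT" then "BT" else ""

-- A's index loop over state, carrying the mutable counter n
def varLoopA : List String → Int → List String
  | [], _ => []
  | s :: rest, n =>
    if (s == "R" || s == "RT") && n > 0 then
      switch_red_blue s :: varLoopA rest (n - 1)
    else
      s :: varLoopA rest n

def variation_red (state : List String) (n : Int) : List String :=
  varLoopA state n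

-- ===== PORT B =====
def pvBlue (s : String) : String :=
  if s == "R" then "B" else if s == "RT" then "BT" else s

-- Source B's first loop: cut index just after the n-th red token
def pvCut : List String → Int → Nat
  | [], _ => 0
  | s :: rest, r =>
    if r == 0 then 0
    else pvCut rest (if s == "R" || s == "RT" then r - 1 else r) + 1

def variation_red_alt (state : List String) (n : Int) : List String :=
  let k := pvCut state (max n 0)
  (state.take k).map pvBlue ++ state.drop k

-- ===== PRECONDITION & SPEC =====
def Spec_variation_red (state : List String) (n : Int) (out : List String) : Prop := out = variation_red_alt state n
instance (state : List String) (n : Int) (out : List String) : Decidable (Spec_variation_red state n out) := by unfold Spec_variation_red; infer_instance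

-- ===== CLAIM (what is proved, stated in full; the proofs are below) =====
def Claim_equal_variation_red : Prop := ∀ (state : List String) (n : Int), Dom_variation_red state n → Spec_variation_red state n (variation_red state n)

-- ===== LEMMAS AND PROOFS =====
lemma varLoopA_nonpos (state : List String) (n : Int) (h : n ≤ 0) :
    varLoopA state n = state := by
  induction state with
  | nil => rfl
  | cons s rest ih =>
    simp only [varLoopA]
    rw [if_neg (by simp; omega), ih]

lemma pvCut_zero (state : List String) : pvCut state 0 = 0 := by
  cases state <;> simp [pvCut]

lemma varLoopA_eq_cut (state : List String) (n : Int) (h : 0 ≤ n) :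
    varLoopA state n =
      (state.take (pvCut state n)).map pvBlue ++ state.drop (pvCut state n) := by
  induction state generalizing n with
  | nil => rfl
  | cons s rest ih =>
    by_cases hn : n = 0
    · subst hn
      rw [varLoopA_nonpos _ _ le_rfl, pvCut_zero]
      simp
    · have hpos : 0 < n := lt_of_le_of_ne h (Ne.symm hn)
      have hn' : (n == 0) = false := by simpa using hn
      by_cases hr : (s == "R" || s == "RT") = true
      · have hb : switch_red_blue s = pvBlue s := by
          rcases Bool.or_eq_true_iff.mp hr with h1 | h1
          · simp [switch_red_blue, pvBlue, eq_of_beq h1]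
          · simp [switch_red_blue, pvBlue, eq_of_beq h1]
        simp only [varLoopA, pvCut, hr, hn', decide_eq_true hpos, Bool.true_and,
          if_true, Bool.false_eq_true, if_false]
        rw [ih (n - 1) (by omega), hb]
        simp [List.take_succ_cons, List.drop_succ_cons]
      · have hb : pvBlue s = s := by
          simp only [Bool.or_eq_true_iff, not_or, Bool.not_eq_true,
            beq_eq_false_iff_ne] at hr
          simp [pvBlue, hr.1, hr.2]
        simp only [varLoopA, pvCut, hr, hn', Bool.false_and, Bool.false_eq_true,
          if_false]
        rw [ih n h]
        simp [List.take_succ_cons, List.drop_succ_cons, hb]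

-- ===== VERDICT (by name: the statement is the Claim_ definition above) =====
theorem variation_red_spec : Claim_equal_variation_red := by
  intro state n _
  unfold Spec_variation_red variation_red variation_red_alt
  by_cases h : 0 ≤ n
  · rw [max_eq_left h]; exact varLoopA_eq_cut state n h
  · rw [max_eq_right (by omega), varLoopA_nonpos state n (by omega)]
    rw [pvCut_zero]
    simp
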